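-- pv_equiv track=rewrite | github.com/daedalus/libciphers | src/libciphers/__init__.py | rolling_key_prime
-- ===== SOURCE A (Python) =====
-- import string
--
-- A = string.ascii_uppercase
--
-- def let2n(c):
--     """Letter to number (A=0, B=1, ..., Z=25)"""
--     return ord(c.upper()) - 65 if c.upper() in A else -1
--
-- def n2let(n):
--     """Number to letter (0=A, 1=B, ..., 25=Z)"""
--     return chr((n % 26) + 65)
--
-- def rolling_key_prime(ct, key):
--     """Rolling key with prime index"""
--     primes = []
--     n = 2
--     while len(primes) <= len(ct):
--         is_prime = all(n % p != 0 for p in primes if p * p <= n)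
--         if is_prime:
--             primes.append(n)
--         n += 1
--     result = []
--     for i, c in enumerate(ct):
--         if c in A:
--             k = let2n(key[i % len(key)])
--             p = primes[i % len(primes)] % 26
--             result.append(n2let((let2n(c) - k - p) % 26))
--         else:
--             result.append(c)
--     return "".join(result)
-- ===== SOURCE B (Python) =====
-- def _k(ch):
--     """Key letter to shift (case-insensitive); -1 for non-letters, as in the original."""
--     u = ch.upper()
--     return ord(u) - 65 if 'A' <= u <= 'Z' else -1
--
-- def rolling_key_prime(ct, key):
--     """Rolling key with prime index, primes from a Sieve of Eratosthenes."""
--     m = len(ct)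
--     bound = 4
--     while True:
--         composite = set()
--         for i in range(2, bound):
--             for j in range(i * i, bound, i):
--                 composite.add(j)
--         primes = [x for x in range(2, bound) if x not in composite]
--         if len(primes) >= m:
--             break
--         bound *= 2
--     return "".join(
--         chr((ord(c) - 65 - _k(key[i % len(key)]) - primes[i]) % 26 + 65)
--         if 'A' <= c <= 'Z' else c
--         for i, c in enumerate(ct))
-- ===== Notes on version B (the rewrite author's own statement) =====
-- stated objective: faster
-- what changed: Replaces A's trial-division prime generator (which scans the entire growing primes list for every candidate n) with a Sieve of Eratosthenes over a doubling bound, and builds the output with a single join comprehension indexing primes[i] directly.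
import Mathlib
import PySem

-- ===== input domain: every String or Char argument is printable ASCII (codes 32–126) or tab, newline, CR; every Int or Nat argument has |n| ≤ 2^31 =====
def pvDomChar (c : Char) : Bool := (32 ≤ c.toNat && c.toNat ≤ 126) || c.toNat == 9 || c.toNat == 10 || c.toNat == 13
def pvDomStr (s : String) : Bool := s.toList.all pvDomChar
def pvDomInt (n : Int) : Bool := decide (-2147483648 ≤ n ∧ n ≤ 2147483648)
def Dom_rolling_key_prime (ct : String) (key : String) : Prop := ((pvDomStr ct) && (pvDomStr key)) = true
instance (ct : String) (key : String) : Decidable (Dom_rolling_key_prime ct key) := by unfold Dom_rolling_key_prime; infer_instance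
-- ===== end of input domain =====

-- B replaces A's trial-division prime generator (which scans the whole primes list for every candidate)
-- by a Sieve of Eratosthenes over a doubling bound: objective 'faster' (measured asymptotic speed-up).

-- ===== PORT A =====
-- let2n: c.upper() inlined; exact on the printable-ASCII domain
def let2n (c : Char) : Int :=
  let u := if 'a' ≤ c ∧ c ≤ 'z' then Char.ofNat (c.toNat - 32) else c
  if 'A' ≤ u ∧ u ≤ 'Z' then (u.toNat : Int) - 65 else -1

def n2let (n : Int) : Char := Char.ofNat (PySem.Int.mod n 26 + 65).toNat

-- the 'while len(primes) <= len(ct)' loop; fuel is only a termination guard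
-- (the proof shows 2^(m+2) strictly exceeds the loop's trip count, so the guard never fires)
def loopA (m : Nat) : Nat → List Nat → Nat → List Nat
  | 0, primes, _ => primes
  | fuel + 1, primes, n =>
    if primes.length ≤ m then
      loopA m fuel
        (if primes.all (fun p => if p * p ≤ n then decide (n % p ≠ 0) else true)
         then primes ++ [n] else primes)
        (n + 1)
    else primes

def rolling_key_prime (ct : String) (key : String) : String :=
  let cs := ct.toList
  let primes := loopA cs.length (2 ^ (cs.length + 2)) [] 2
  String.ofList (cs.zipIdx.map (fun ci =>
    if 'A' ≤ ci.1 ∧ ci.1 ≤ 'Z' then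
      -- key[i % len(key)]: Pre_ excludes the empty-key ZeroDivisionError, the default is never read there
      n2let (PySem.Int.mod
        (let2n ci.1 - let2n (key.toList.getD (ci.2 % key.toList.length) 'A')
          - ((primes.getD (ci.2 % primes.length) 0 % 26 : Nat) : Int)) 26)
    else ci.1))

-- ===== PORT B =====
-- ch.upper(); exact on the printable-ASCII domain
def upperB (c : Char) : Char := if 'a' ≤ c ∧ c ≤ 'z' then Char.ofNat (c.toNat - 32) else c

def kB (ch : Char) : Int :=
  let u := upperB ch
  if 'A' ≤ u ∧ u ≤ 'Z' then (u.toNat : Int) - 65 else -1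

-- the set-based Sieve of Eratosthenes of Source B
def sieveB (bound : Nat) : List Int :=
  let composite : PySem.Set Int :=
    (PySem.List.pyRange 2 (bound : Int) 1).foldl
      (fun st i => (PySem.List.pyRange (i * i) (bound : Int) i).foldl
        (fun st j => PySem.Set.add st j) st)
      PySem.Set.empty
  (PySem.List.pyRange 2 (bound : Int) 1).filter (fun x => !(PySem.Set.contains composite x))

-- 'while True: sieve; if enough primes: break; bound *= 2'; fuel is only a termination guard
-- (the proof shows the bound 4 * 2^m already yields enough primes, so the guard never fires)
def loopB (m : Nat) : Nat → Nat → List Int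
  | 0, bound => sieveB bound
  | fuel + 1, bound =>
    let primes := sieveB bound
    if m ≤ primes.length then primes else loopB m fuel (bound * 2)

def rolling_key_prime_alt (ct : String) (key : String) : String :=
  let cs := ct.toList
  let primes := loopB cs.length cs.length 4
  String.ofList (cs.zipIdx.map (fun ci =>
    if 'A' ≤ ci.1 ∧ ci.1 ≤ 'Z' then
      Char.ofNat ((PySem.Int.mod
        ((ci.1.toNat : Int) - 65 - kB (key.toList.getD (ci.2 % key.toList.length) 'A')
          - primes.getD ci.2 0) 26) + 65).toNat
    else ci.1))

-- ===== PRECONDITION & SPEC =====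
-- Pre_ excludes only the inputs where A raises: an empty key together with an uppercase letter
-- in ct makes A evaluate key[i % 0] — ZeroDivisionError (B raises there too).
def Pre_rolling_key_prime (ct : String) (key : String) : Prop :=
  key.toList ≠ [] ∨ ∀ c ∈ ct.toList, ¬('A' ≤ c ∧ c ≤ 'Z')
instance (ct : String) (key : String) : Decidable (Pre_rolling_key_prime ct key) := by
  unfold Pre_rolling_key_prime; infer_instance

def pvWitness_rolling_key_prime : String × String := ("Hello, WORLD!", "Key")

def Spec_rolling_key_prime (ct : String) (key : String) (out : String) : Prop := out = rolling_key_prime_alt ct key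
instance (ct : String) (key : String) (out : String) : Decidable (Spec_rolling_key_prime ct key out) := by unfold Spec_rolling_key_prime; infer_instance

-- ===== CLAIM (what is proved, stated in full; the proofs are below) =====
def Claim_equal_rolling_key_prime : Prop := ∀ (ct : String) (key : String), Dom_rolling_key_prime ct key → Pre_rolling_key_prime ct key → Spec_rolling_key_prime ct key (rolling_key_prime ct key)

-- ===== LEMMAS AND PROOFS =====

-- the first primes, as the filtered range [2, b)
def pvPrimes (b : Nat) : List Nat := (List.range' 2 (b - 2)).filter (fun x => decide (Nat.Prime x))

theorem pvPrimes_split (a b : Nat) (h2 : 2 ≤ a) (hab : a ≤ b) :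
    pvPrimes b = pvPrimes a ++ (List.range' a (b - a)).filter (fun x => decide (Nat.Prime x)) := by
  have h := @List.range'_append 2 (a - 2) (b - a) 1
  rw [show 2 + 1 * (a - 2) = a by omega, show a - 2 + (b - a) = b - 2 by omega] at h
  rw [pvPrimes, pvPrimes, ← h, List.filter_append]

theorem pvPrimes_length_mono (a b : Nat) (h2 : 2 ≤ a) (hab : a ≤ b) :
    (pvPrimes a).length ≤ (pvPrimes b).length := by
  rw [pvPrimes_split a b h2 hab, List.length_append]; omega

theorem pvPrimes_getElem_agree (a b i : Nat) (h2 : 2 ≤ a) (h2b : 2 ≤ b)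
    (hia : i < (pvPrimes a).length) (hib : i < (pvPrimes b).length) :
    (pvPrimes a)[i] = (pvPrimes b)[i] := by
  rcases le_total a b with h | h
  · have hq : (pvPrimes b)[i]? = (pvPrimes a)[i]? := by
      rw [pvPrimes_split a b h2 h]; exact List.getElem?_append_left hia
    rw [List.getElem?_eq_getElem hib, List.getElem?_eq_getElem hia] at hq
    exact (Option.some.inj hq).symm
  · have hq : (pvPrimes a)[i]? = (pvPrimes b)[i]? := by
      rw [pvPrimes_split b a h2b h]; exact List.getElem?_append_left hib
    rw [List.getElem?_eq_getElem hia, List.getElem?_eq_getElem hib] at hq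
    exact Option.some.inj hq

theorem pv_exists_prime_factor (n : Nat) (h2 : 2 ≤ n) (hnp : ¬ Nat.Prime n) :
    ∃ p, Nat.Prime p ∧ p * p ≤ n ∧ p ∣ n := by
  refine ⟨n.minFac, Nat.minFac_prime (by omega), ?_, Nat.minFac_dvd n⟩
  have := Nat.minFac_sq_le_self (by omega) hnp
  nlinarith [this]

theorem pv_not_prime_iff (n : Nat) (h2 : 2 ≤ n) :
    ¬ Nat.Prime n ↔ ∃ p, 2 ≤ p ∧ p * p ≤ n ∧ p ∣ n := by
  constructor
  · intro h
    obtain ⟨p, hp, hsq, hdvd⟩ := pv_exists_prime_factor n h2 h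
    exact ⟨p, hp.two_le, hsq, hdvd⟩
  · rintro ⟨p, hp2, hsq, hdvd⟩ hn
    rcases hn.eq_one_or_self_of_dvd p hdvd with h | h
    · omega
    · subst h; nlinarith

theorem pv_checkA (n : Nat) (h2 : 2 ≤ n) :
    ((pvPrimes n).all (fun p => if p * p ≤ n then decide (n % p ≠ 0) else true))
      = decide (Nat.Prime n) := by
  by_cases hp : Nat.Prime n
  · simp only [hp, decide_true, List.all_eq_true]
    intro p hmem
    simp only [pvPrimes, List.mem_filter, List.mem_range', decide_eq_true_eq] at hmem
    obtain ⟨⟨i, hi, hpi⟩, hpp⟩ := hmem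
    split_ifs with hsq
    · simp only [decide_eq_true_eq]
      intro hmod
      have hdvd : p ∣ n := Nat.dvd_of_mod_eq_zero hmod
      rcases hp.eq_one_or_self_of_dvd p hdvd with h | h
      · exact absurd h (by have := hpp.two_le; omega)
      · omega
    · rfl
  · simp only [hp, decide_false, List.all_eq_false]
    obtain ⟨p, hpp, hsq, hdvd⟩ := pv_exists_prime_factor n h2 hp
    have hp2 := hpp.two_le
    have hplt : p < n := by nlinarith
    refine ⟨p, ?_, ?_⟩
    · simp only [pvPrimes, List.mem_filter, List.mem_range', decide_eq_true_eq]
      exact ⟨⟨p - 2, by omega, by omega⟩, hpp⟩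
    · simp [hsq, Nat.mod_eq_zero_of_dvd hdvd]

theorem pvPrimes_succ (n : Nat) (h2 : 2 ≤ n) :
    pvPrimes (n + 1) = if Nat.Prime n then pvPrimes n ++ [n] else pvPrimes n := by
  have h := @List.range'_append 2 (n - 2) 1 1
  rw [show 2 + 1 * (n - 2) = n by omega] at h
  have hr : List.range' 2 (n + 1 - 2) = List.range' 2 (n - 2) ++ [n] := by
    rw [show n + 1 - 2 = n - 2 + 1 by omega, ← h, List.range'_one]
  rw [pvPrimes, hr, List.filter_append, List.filter_singleton]
  split_ifs with hp <;> simp_all [pvPrimes]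

theorem loopA_stop (m fuel : Nat) (primes : List Nat) (n : Nat) (h : m < primes.length) :
    loopA m fuel primes n = primes := by
  cases fuel <;> simp [loopA, Nat.not_le.mpr h]

theorem loopA_inv (m : Nat) : ∀ fuel n, 2 ≤ n → (pvPrimes n).length ≤ m →
    m < (pvPrimes (n + fuel)).length →
    ∃ N, 2 ≤ N ∧ loopA m fuel (pvPrimes n) n = pvPrimes N ∧ (pvPrimes N).length = m + 1 := by
  intro fuel
  induction fuel with
  | zero => intro n _ h1 h2; simp only [Nat.add_zero] at h2; omega
  | succ fuel ih =>
    intro n h2 hle hbig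
    rw [loopA, if_pos hle, pv_checkA n h2]
    have hstep : (if decide (Nat.Prime n) = true then pvPrimes n ++ [n] else pvPrimes n)
        = pvPrimes (n + 1) := by
      rw [pvPrimes_succ n h2]; split_ifs with h <;> simp_all
    rw [hstep]
    have hgrow : (pvPrimes (n + 1)).length ≤ (pvPrimes n).length + 1 := by
      rw [pvPrimes_succ n h2]; split_ifs <;> simp
    by_cases hc : (pvPrimes (n + 1)).length ≤ m
    · exact ih (n + 1) (by omega) hc (by rw [show n + 1 + fuel = n + (fuel + 1) by omega]; exact hbig)
    · rw [Nat.not_le] at hc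
      exact ⟨n + 1, by omega, loopA_stop _ _ _ _ hc, by omega⟩

theorem pv_primes_in_pow : ∀ k, k + 1 ≤ (pvPrimes (2 ^ (k + 2))).length := by
  intro k
  induction k with
  | zero => decide
  | succ k ih =>
    obtain ⟨p, hp, hlt, hle⟩ :=
      Nat.exists_prime_lt_and_le_two_mul (2 ^ (k + 2)) (Nat.two_pow_pos _).ne'
    have hpow : 2 ^ (k + 3) = 2 * 2 ^ (k + 2) := by ring
    have h4 : 4 ≤ 2 ^ (k + 2) := by
      calc (4 : Nat) = 2 ^ 2 := by norm_num
      _ ≤ 2 ^ (k + 2) := Nat.pow_le_pow_right (by norm_num) (by omega)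
    have hne : p ≠ 2 ^ (k + 3) := by
      intro h
      have h2d : (2 : Nat) ∣ p := h ▸ dvd_pow_self 2 (by omega)
      rcases hp.eq_one_or_self_of_dvd 2 h2d with h' | h' <;> omega
    have hsplit := pvPrimes_split (2 ^ (k + 2)) (2 ^ (k + 3)) (by omega) (by omega)
    have hmem : p ∈ (List.range' (2 ^ (k + 2)) (2 ^ (k + 3) - 2 ^ (k + 2))).filter
        (fun x => decide (Nat.Prime x)) := by
      simp only [List.mem_filter, List.mem_range', decide_eq_true_eq]
      exact ⟨⟨p - 2 ^ (k + 2), by omega, by omega⟩, hp⟩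
    have hpos : 1 ≤ ((List.range' (2 ^ (k + 2)) (2 ^ (k + 3) - 2 ^ (k + 2))).filter
        (fun x => decide (Nat.Prime x))).length := List.length_pos_of_mem hmem
    rw [hsplit, List.length_append]
    omega

theorem pv_genA_spec (m : Nat) :
    ∃ N, 2 ≤ N ∧ loopA m (2 ^ (m + 2)) [] 2 = pvPrimes N ∧ (pvPrimes N).length = m + 1 := by
  have h0 : pvPrimes 2 = [] := rfl
  have hbig : m < (pvPrimes (2 + 2 ^ (m + 2))).length := by
    have h1 := pv_primes_in_pow m
    have h2 := pvPrimes_length_mono (2 ^ (m + 2)) (2 + 2 ^ (m + 2))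
      (by have h := Nat.one_le_two_pow (n := m + 1)
          have he : 2 ^ (m + 2) = 2 * 2 ^ (m + 1) := by ring
          omega) (by omega)
    omega
  have := loopA_inv m (2 ^ (m + 2)) 2 (by omega) (by simp [h0]) hbig
  rwa [h0] at this

-- B-side: set/fold membership
theorem pv_mem_foldl_add (l : List Int) (s : PySem.Set Int) (x : Int) :
    x ∈ l.foldl (fun st j => PySem.Set.add st j) s ↔ x ∈ s ∨ x ∈ l := by
  induction l generalizing s with
  | nil => simp
  | cons a l ih =>
    simp only [List.foldl_cons, ih, PySem.Set.mem_add, List.mem_cons]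
    tauto

theorem pv_mem_sieve_fold (f : Int → List Int) (l : List Int) (s : PySem.Set Int) (x : Int) :
    x ∈ l.foldl (fun st i => (f i).foldl (fun st j => PySem.Set.add st j) st) s ↔
      x ∈ s ∨ ∃ i ∈ l, x ∈ f i := by
  induction l generalizing s with
  | nil => simp
  | cons a l ih =>
    simp only [List.foldl_cons, ih, pv_mem_foldl_add, List.mem_cons]
    constructor
    · rintro ((h | h) | ⟨i, hi, hx⟩)
      · exact Or.inl h
      · exact Or.inr ⟨a, Or.inl rfl, h⟩
      · exact Or.inr ⟨i, Or.inr hi, hx⟩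
    · rintro (h | ⟨i, (rfl | hi), hx⟩)
      · exact Or.inl (Or.inl h)
      · exact Or.inl (Or.inr hx)
      · exact Or.inr ⟨i, hi, hx⟩

theorem pv_composite_char (bound n : Nat) (h2 : 2 ≤ n) (hb : n < bound) :
    ((((List.range' 2 (bound - 2)).map (fun k : Nat => (k : Int))).foldl
      (fun st i => (PySem.List.pyRange (i * i) (bound : Int) i).foldl
        (fun st j => PySem.Set.add st j) st)
      PySem.Set.empty).contains (n : Int)) = decide (¬ Nat.Prime n) := by
  have hchar : ((n : Int) ∈ (((List.range' 2 (bound - 2)).map (fun k : Nat => (k : Int))).foldl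
      (fun st i => (PySem.List.pyRange (i * i) (bound : Int) i).foldl
        (fun st j => PySem.Set.add st j) st)
      PySem.Set.empty)) ↔ ¬ Nat.Prime n := by
    rw [pv_mem_sieve_fold, pv_not_prime_iff n h2]
    constructor
    · rintro (h | ⟨i, hiR, hmem⟩)
      · simp [PySem.Set.empty] at h
      · simp only [List.mem_map, List.mem_range'] at hiR
        obtain ⟨j, ⟨t, ht, hjt⟩, rfl⟩ := hiR
        have hj2 : 2 ≤ j := by omega
        have hjpos : (0 : Int) < (j : Int) := by exact_mod_cast (by omega : 0 < j)
        rw [PySem.List.mem_pyRange_iff_of_pos hjpos] at hmem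
        obtain ⟨hle, hlt, hdvd⟩ := hmem
        refine ⟨j, hj2, ?_, ?_⟩
        · exact_mod_cast (by push_cast at hle ⊢; linarith : ((j * j : Nat) : Int) ≤ (n : Int))
        · have hdj : (j : Int) ∣ (n : Int) := by
            have h1 : (j : Int) ∣ ((j : Int) * (j : Int)) := Dvd.intro _ rfl
            have := dvd_add hdvd h1
            rwa [sub_add_cancel] at this
          exact_mod_cast hdj
    · rintro ⟨p, hp2, hsq, hdvd⟩
      right
      have hpb : p < bound := by nlinarith
      refine ⟨(p : Int), ?_, ?_⟩
      · simp only [List.mem_map, List.mem_range']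
        exact ⟨p, ⟨p - 2, by omega, by omega⟩, rfl⟩
      · have hppos : (0 : Int) < (p : Int) := by exact_mod_cast (by omega : 0 < p)
        rw [PySem.List.mem_pyRange_iff_of_pos hppos]
        refine ⟨by exact_mod_cast hsq, by exact_mod_cast hb, ?_⟩
        have h1 : (p : Int) ∣ ((p : Int) * (p : Int)) := Dvd.intro _ rfl
        have h2' : (p : Int) ∣ (n : Int) := by exact_mod_cast hdvd
        exact dvd_sub h2' h1
  by_cases hP : Nat.Prime n
  · have hne : ¬ ((((List.range' 2 (bound - 2)).map (fun k : Nat => (k : Int))).foldl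
        (fun st i => (PySem.List.pyRange (i * i) (bound : Int) i).foldl
          (fun st j => PySem.Set.add st j) st)
        PySem.Set.empty).contains (n : Int) = true) := by
      intro h
      exact (hchar.mp ((PySem.Set.contains_iff _ _).mp h)) hP
    simp only [hP, not_true, decide_false]
    exact Bool.not_eq_true _ ▸ (Bool.eq_false_iff.mpr hne)
  · simp only [hP, not_false_iff, decide_true]
    exact (PySem.Set.contains_iff _ _).mpr (hchar.mpr hP)

theorem pv_sieveB_eq (bound : Nat) (hb : 2 ≤ bound) :
    sieveB bound = (pvPrimes bound).map (fun n : Nat => (n : Int)) := by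
  have hrange : PySem.List.pyRange 2 (bound : Int) 1
      = (List.range' 2 (bound - 2)).map (fun n : Nat => (n : Int)) := by
    rw [PySem.List.pyRange_one, List.range'_eq_map_range, List.map_map]
    rw [show ((bound : Int) - 2).toNat = bound - 2 by omega]
    apply List.map_congr_left
    intro k _
    simp
  rw [sieveB, hrange, List.filter_map, pvPrimes]
  refine congrArg (List.map (fun n : Nat => (n : Int))) ?_
  apply List.filter_congr
  intro n hn
  simp only [List.mem_range'] at hn
  obtain ⟨i, hi, hni⟩ := hn
  have h2 : 2 ≤ n := by omega
  have hnb : n < bound := by omega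
  simp only [Function.comp_apply]
  rw [pv_composite_char bound n h2 hnb]
  simp [decide_not]

theorem loopB_spec (m : Nat) : ∀ fuel bound, 2 ≤ bound →
    m ≤ (pvPrimes (bound * 2 ^ fuel)).length →
    ∃ M, 2 ≤ M ∧ loopB m fuel bound = (pvPrimes M).map (fun n : Nat => (n : Int)) ∧
      m ≤ (pvPrimes M).length := by
  intro fuel
  induction fuel with
  | zero =>
    intro bound hb h
    rw [pow_zero, mul_one] at h
    refine ⟨bound, hb, ?_, h⟩
    show sieveB bound = _
    exact pv_sieveB_eq bound hb
  | succ fuel ih =>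
    intro bound hb h
    simp only [loopB]
    rw [pv_sieveB_eq bound hb, List.length_map]
    by_cases hc : m ≤ (pvPrimes bound).length
    · rw [if_pos hc]
      exact ⟨bound, hb, rfl, hc⟩
    · rw [if_neg hc]
      apply ih (bound * 2) (by omega)
      rw [show bound * 2 * 2 ^ fuel = bound * 2 ^ (fuel + 1) by ring]
      exact h

theorem pv_genB_spec (m : Nat) :
    ∃ M, 2 ≤ M ∧ loopB m m 4 = (pvPrimes M).map (fun n : Nat => (n : Int)) ∧
      m ≤ (pvPrimes M).length := by
  apply loopB_spec m m 4 (by omega)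
  have h1 := pv_primes_in_pow m
  have he : 4 * 2 ^ m = 2 ^ (m + 2) := by ring
  rw [he]; omega

theorem let2n_eq_kB (c : Char) : let2n c = kB c := rfl

theorem pv_upper_let2n (c : Char) (h : 'A' ≤ c ∧ c ≤ 'Z') : let2n c = (c.toNat : Int) - 65 := by
  have hna : ¬ ('a' ≤ c ∧ c ≤ 'z') := by
    rintro ⟨h1, -⟩
    exact absurd (le_trans h1 h.2) (by decide)
  simp [let2n, hna, h]

-- ===== VERDICT helper: the main equality =====
theorem rolling_key_prime_spec : Claim_equal_rolling_key_prime := by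
  intro ct key _ hpre
  unfold Spec_rolling_key_prime
  obtain ⟨N, hN2, hA, hAlen⟩ := pv_genA_spec ct.toList.length
  obtain ⟨M, hM2, hB, hMlen⟩ := pv_genB_spec ct.toList.length
  simp only [rolling_key_prime, rolling_key_prime_alt]
  rw [hA, hB]
  congr 1
  apply List.map_congr_left
  rintro ⟨c, i⟩ hmem
  obtain ⟨-, hilt, hci⟩ := List.mem_zipIdx hmem
  simp only [Nat.zero_add, Nat.sub_zero] at hilt hci
  by_cases hup : 'A' ≤ c ∧ c ≤ 'Z'
  · simp only [hup, and_self, if_true]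
    have hkey : key.toList ≠ [] := by
      rcases hpre with h | h
      · exact h
      · exfalso
        exact h c (hci ▸ List.getElem_mem _) hup
    have hm : i < ct.toList.length := hilt
    -- the two prime-list entries agree
    have hiA : i < (pvPrimes N).length := by omega
    have hiB : i < (pvPrimes M).length := by omega
    have hidx : i % (pvPrimes N).length = i := by rw [hAlen, Nat.mod_eq_of_lt (by omega)]
    have hgA : (pvPrimes N).getD (i % (pvPrimes N).length) 0 = (pvPrimes N)[i] := by
      rw [hidx]; exact List.getD_eq_getElem _ _ hiA
    have hgB : ((pvPrimes M).map (fun n : Nat => (n : Int))).getD i 0 = ((pvPrimes M)[i] : Int) := by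
      have : i < ((pvPrimes M).map (fun n : Nat => (n : Int))).length := by simpa using hiB
      rw [List.getD_eq_getElem _ _ this, List.getElem_map]
    have hagree : (pvPrimes N)[i] = (pvPrimes M)[i] :=
      pvPrimes_getElem_agree N M i hN2 hM2 hiA hiB
    rw [hgA, hgB, hagree]
    set p : Nat := (pvPrimes M)[i] with hp
    -- both characters
    rw [pv_upper_let2n c hup, ← let2n_eq_kB]
    set k : Int := let2n (key.toList.getD (i % key.toList.length) 'A') with hk
    rw [n2let]
    congr 2
    have h26 : (0 : Int) < 26 := by norm_num
    simp only [PySem.Int.mod_eq_emod_of_pos h26]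
    rw [Int.emod_emod_of_dvd _ dvd_rfl]
    push_cast
    omega
  · simp only [hup, if_false]
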